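-- pv_equiv track=rewrite | github.com/Dhannu128/GANGU | agents/search_agent.py | normalize_item_name
-- ===== SOURCE A (Python) =====
-- ITEM_SYNONYMS = {
--     "white chickpeas": ["kabuli chana", "safed chana", "white chana", "chana", "chickpeas"],
--     "rice": ["chawal", "basmati rice", "basmati"],
--     "milk": ["doodh", "toned milk", "full cream milk"],
--     "paracetamol": ["acetaminophen", "dolo", "crocin"],
--     "dal": ["lentils", "daal", "toor dal", "moong dal"],
--     "atta": ["wheat flour", "flour", "gehun ka atta"],
--     "onion": ["pyaz", "kanda"],
--     "potato": ["aloo"],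
--     "tomato": ["tamatar"],
--     "bread": ["pav", "double roti"],
--     "sugar": ["cheeni", "shakkar"],
--     "salt": ["namak"],
--     "oil": ["tel", "cooking oil"],
--     "ghee": ["desi ghee"],
--     "paneer": ["cottage cheese"],
--     "curd": ["dahi", "yogurt"],
--     "butter": ["makhan"]
-- }
--
-- def normalize_item_name(item: str) -> str:
--     """Normalize item name using synonyms"""
--     item_lower = item.lower().strip()
--
--     # Direct match
--     if item_lower in ITEM_SYNONYMS:
--         return item_lower
--
--     # Check if it's a synonym
--     for base_item, synonyms in ITEM_SYNONYMS.items():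
--         if item_lower in synonyms or item_lower == base_item:
--             return base_item
--
--     return item_lower
-- ===== SOURCE B (Python) =====
-- # Flat canonical-name table: every base name and synonym maps directly to its base.
-- CANON = {
--     'white chickpeas': 'white chickpeas',
--     'rice': 'rice',
--     'milk': 'milk',
--     'paracetamol': 'paracetamol',
--     'dal': 'dal',
--     'atta': 'atta',
--     'onion': 'onion',
--     'potato': 'potato',
--     'tomato': 'tomato',
--     'bread': 'bread',
--     'sugar': 'sugar',
--     'salt': 'salt',
--     'oil': 'oil',
--     'ghee': 'ghee',
--     'paneer': 'paneer',
--     'curd': 'curd',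
--     'butter': 'butter',
--     'kabuli chana': 'white chickpeas',
--     'safed chana': 'white chickpeas',
--     'white chana': 'white chickpeas',
--     'chana': 'white chickpeas',
--     'chickpeas': 'white chickpeas',
--     'chawal': 'rice',
--     'basmati rice': 'rice',
--     'basmati': 'rice',
--     'doodh': 'milk',
--     'toned milk': 'milk',
--     'full cream milk': 'milk',
--     'acetaminophen': 'paracetamol',
--     'dolo': 'paracetamol',
--     'crocin': 'paracetamol',
--     'lentils': 'dal',
--     'daal': 'dal',
--     'toor dal': 'dal',
--     'moong dal': 'dal',
--     'wheat flour': 'atta',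
--     'flour': 'atta',
--     'gehun ka atta': 'atta',
--     'pyaz': 'onion',
--     'kanda': 'onion',
--     'aloo': 'potato',
--     'tamatar': 'tomato',
--     'pav': 'bread',
--     'double roti': 'bread',
--     'cheeni': 'sugar',
--     'shakkar': 'sugar',
--     'namak': 'salt',
--     'tel': 'oil',
--     'cooking oil': 'oil',
--     'desi ghee': 'ghee',
--     'cottage cheese': 'paneer',
--     'dahi': 'curd',
--     'yogurt': 'curd',
--     'makhan': 'butter',
-- }
--
--
-- def normalize_item_name(item: str) -> str:
--     """Normalize item name using synonyms"""
--     item_lower = item.lower().strip()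
--     return CANON.get(item_lower, item_lower)
-- ===== Notes on version B (the rewrite author's own statement) =====
-- stated objective: idiomatic
-- what changed: Replaces the per-call linear scan over the base->synonyms table with a single .get on a flat precomputed canonical-name dict mapping every base name and synonym directly to its base.
import Mathlib
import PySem

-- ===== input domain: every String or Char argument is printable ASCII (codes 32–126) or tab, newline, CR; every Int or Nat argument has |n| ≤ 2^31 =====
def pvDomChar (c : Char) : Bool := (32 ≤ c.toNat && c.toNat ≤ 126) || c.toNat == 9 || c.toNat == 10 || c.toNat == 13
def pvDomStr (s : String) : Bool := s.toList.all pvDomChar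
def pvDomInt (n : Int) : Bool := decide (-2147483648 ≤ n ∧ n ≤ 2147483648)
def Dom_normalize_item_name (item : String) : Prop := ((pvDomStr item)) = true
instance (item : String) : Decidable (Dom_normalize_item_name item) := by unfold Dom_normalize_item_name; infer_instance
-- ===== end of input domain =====

set_option maxRecDepth 100000


-- B replaces A's per-call linear scan of the base->synonyms table by one lookup
-- in a flat precomputed canonical-name dict (name -> base); more idiomatic.

-- ===== PORT A =====
def ITEM_SYNONYMS : List (String × List String) := [
  ("white chickpeas", ["kabuli chana", "safed chana", "white chana", "chana", "chickpeas"]),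
  ("rice", ["chawal", "basmati rice", "basmati"]),
  ("milk", ["doodh", "toned milk", "full cream milk"]),
  ("paracetamol", ["acetaminophen", "dolo", "crocin"]),
  ("dal", ["lentils", "daal", "toor dal", "moong dal"]),
  ("atta", ["wheat flour", "flour", "gehun ka atta"]),
  ("onion", ["pyaz", "kanda"]),
  ("potato", ["aloo"]),
  ("tomato", ["tamatar"]),
  ("bread", ["pav", "double roti"]),
  ("sugar", ["cheeni", "shakkar"]),
  ("salt", ["namak"]),
  ("oil", ["tel", "cooking oil"]),
  ("ghee", ["desi ghee"]),
  ("paneer", ["cottage cheese"]),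
  ("curd", ["dahi", "yogurt"]),
  ("butter", ["makhan"])]

-- the 'for base_item, synonyms in ITEM_SYNONYMS.items()' loop with its early returns
def synLoop (s : String) : List (String × List String) → String
  | [] => s
  | (b, syns) :: rest => if syns.contains s || s == b then b else synLoop s rest

def normalize_item_name (item : String) : String :=
  let item_lower := PySem.Str.strip (PySem.Str.lower item)
  if ITEM_SYNONYMS.any (fun p => p.1 == item_lower) then item_lower
  else synLoop item_lower ITEM_SYNONYMS

-- ===== PORT B =====
-- the flat module-level table of Source B: every base name and synonym -> its base
def CANON : PySem.Dict String String := PySem.Dict.ofList [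
  ("white chickpeas", "white chickpeas"),
  ("rice", "rice"),
  ("milk", "milk"),
  ("paracetamol", "paracetamol"),
  ("dal", "dal"),
  ("atta", "atta"),
  ("onion", "onion"),
  ("potato", "potato"),
  ("tomato", "tomato"),
  ("bread", "bread"),
  ("sugar", "sugar"),
  ("salt", "salt"),
  ("oil", "oil"),
  ("ghee", "ghee"),
  ("paneer", "paneer"),
  ("curd", "curd"),
  ("butter", "butter"),
  ("kabuli chana", "white chickpeas"),
  ("safed chana", "white chickpeas"),
  ("white chana", "white chickpeas"),
  ("chana", "white chickpeas"),
  ("chickpeas", "white chickpeas"),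
  ("chawal", "rice"),
  ("basmati rice", "rice"),
  ("basmati", "rice"),
  ("doodh", "milk"),
  ("toned milk", "milk"),
  ("full cream milk", "milk"),
  ("acetaminophen", "paracetamol"),
  ("dolo", "paracetamol"),
  ("crocin", "paracetamol"),
  ("lentils", "dal"),
  ("daal", "dal"),
  ("toor dal", "dal"),
  ("moong dal", "dal"),
  ("wheat flour", "atta"),
  ("flour", "atta"),
  ("gehun ka atta", "atta"),
  ("pyaz", "onion"),
  ("kanda", "onion"),
  ("aloo", "potato"),
  ("tamatar", "tomato"),
  ("pav", "bread"),
  ("double roti", "bread"),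
  ("cheeni", "sugar"),
  ("shakkar", "sugar"),
  ("namak", "salt"),
  ("tel", "oil"),
  ("cooking oil", "oil"),
  ("desi ghee", "ghee"),
  ("cottage cheese", "paneer"),
  ("dahi", "curd"),
  ("yogurt", "curd"),
  ("makhan", "butter")]

def normalize_item_name_alt (item : String) : String :=
  let item_lower := PySem.Str.strip (PySem.Str.lower item)
  CANON.getD item_lower item_lower

-- ===== PRECONDITION & SPEC =====
def Spec_normalize_item_name (item : String) (out : String) : Prop := out = normalize_item_name_alt item
instance (item : String) (out : String) : Decidable (Spec_normalize_item_name item out) := by unfold Spec_normalize_item_name; infer_instance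

-- ===== CLAIM (what is proved, stated in full; the proofs are below) =====
def Claim_equal_normalize_item_name : Prop := ∀ (item : String), Dom_normalize_item_name item → Spec_normalize_item_name item (normalize_item_name item)

-- ===== LEMMAS AND PROOFS =====

-- every name occurring anywhere in A's table
def pvAllNames : List String := ITEM_SYNONYMS.flatMap (fun p => p.1 :: p.2)

-- on names in the table, the two core computations agree (finite check)
theorem agree_mem : ∀ s ∈ pvAllNames,
    (if ITEM_SYNONYMS.any (fun p => p.1 == s) then s else synLoop s ITEM_SYNONYMS)
      = CANON.getD s s := by decide

theorem synLoop_of_not_mem (s : String) :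
    ∀ (t : List (String × List String)), (∀ p ∈ t, s ≠ p.1 ∧ s ∉ p.2) → synLoop s t = s := by
  intro t
  induction t with
  | nil => intro _; rfl
  | cons hd tl ih =>
    intro h
    obtain ⟨h1, h2⟩ := h hd (List.mem_cons_self ..)
    obtain ⟨b, syns⟩ := hd
    simp only [synLoop]
    rw [if_neg]
    · exact ih fun p hp => h p (List.mem_cons_of_mem _ hp)
    · simp_all

theorem keys_subset : ∀ k ∈ CANON.keys, k ∈ pvAllNames := by decide

theorem agree_not_mem (s : String) (hs : s ∉ pvAllNames) :
    (if ITEM_SYNONYMS.any (fun p => p.1 == s) then s else synLoop s ITEM_SYNONYMS)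
      = CANON.getD s s := by
  have hfacts : ∀ p ∈ ITEM_SYNONYMS, s ≠ p.1 ∧ s ∉ p.2 := by
    intro p hp
    constructor
    · intro h; exact hs (List.mem_flatMap.mpr ⟨p, hp, by simp [h]⟩)
    · intro h; exact hs (List.mem_flatMap.mpr ⟨p, hp, by simp [h]⟩)
  have hB : CANON.getD s s = s := by
    apply PySem.Dict.getD_of_not_contains
    rw [PySem.Dict.contains_eq_decide_mem_keys]
    simp only [decide_eq_false_iff_not]
    intro hk; exact hs (keys_subset s hk)
  rw [hB, synLoop_of_not_mem s ITEM_SYNONYMS hfacts]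
  split
  · rfl
  · rfl

-- ===== VERDICT (by name: the statement is the Claim_ definition above) =====
theorem normalize_item_name_spec : Claim_equal_normalize_item_name := by
  intro item _
  unfold Spec_normalize_item_name normalize_item_name normalize_item_name_alt
  set s := PySem.Str.strip (PySem.Str.lower item) with hs
  by_cases h : s ∈ pvAllNames
  · exact agree_mem s h
  · exact agree_not_mem s h
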